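-- pv_equiv track=rewrite | github.com/Stephanite/ComputerProgrammingUltimatePythonRepository | 06ListsAndLoops/Assignment/main.py | is_incrementing
-- ===== SOURCE A (Python) =====
-- def is_incrementing(integers):
--     lastItem=0
--     for integer in integers:
--         if integer==lastItem+1:
--             lastItem=integer
--         else:
--             return False
--     return True
-- ===== SOURCE B (Python) =====
-- def is_incrementing(integers):
--     return integers == list(range(1, len(integers) + 1))
-- ===== Notes on version B (the rewrite author's own statement) =====
-- stated objective: simpler
-- what changed: Replaces the element-by-element walk with a running lastItem by building the canonical sequence list(range(1, n+1)) once and comparing the whole list at once.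
import Mathlib
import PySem

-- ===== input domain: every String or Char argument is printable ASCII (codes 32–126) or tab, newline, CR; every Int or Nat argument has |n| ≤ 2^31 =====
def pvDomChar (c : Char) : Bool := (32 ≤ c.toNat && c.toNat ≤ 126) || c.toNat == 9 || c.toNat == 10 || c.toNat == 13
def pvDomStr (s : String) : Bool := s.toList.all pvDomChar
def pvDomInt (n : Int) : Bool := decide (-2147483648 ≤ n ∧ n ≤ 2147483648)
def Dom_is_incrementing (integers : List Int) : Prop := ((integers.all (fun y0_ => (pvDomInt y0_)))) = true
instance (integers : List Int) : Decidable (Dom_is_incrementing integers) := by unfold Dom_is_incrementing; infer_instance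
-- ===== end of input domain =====

-- B replaces A's element-by-element walk (running lastItem) by building the canonical
-- list range(1, n+1) once and comparing whole lists; objective: simpler.

-- ===== PORT A =====
-- the for-loop with early return False, carrying lastItem
def isIncLoop (lastItem : Int) (integers : List Int) : Bool :=
  match integers with
  | [] => true
  | integer :: rest =>
    if integer = lastItem + 1 then isIncLoop integer rest
    else false

def is_incrementing (integers : List Int) : Bool := isIncLoop 0 integers

-- ===== PORT B =====
def is_incrementing_alt (integers : List Int) : Bool :=
  integers = PySem.List.pyRange 1 ((integers.length : Int) + 1) 1

-- ===== PRECONDITION & SPEC =====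
def Spec_is_incrementing (integers : List Int) (out : Bool) : Prop := out = is_incrementing_alt integers
instance (integers : List Int) (out : Bool) : Decidable (Spec_is_incrementing integers out) := by unfold Spec_is_incrementing; infer_instance

-- ===== CLAIM (what is proved, stated in full; the proofs are below) =====
def Claim_equal_is_incrementing : Prop := ∀ (integers : List Int), Dom_is_incrementing integers → Spec_is_incrementing integers (is_incrementing integers)

-- ===== LEMMAS AND PROOFS =====

theorem isIncLoop_eq_range (integers : List Int) :
    ∀ k : Int, isIncLoop k integers
      = decide (integers = PySem.List.pyRange (k + 1) (k + 1 + (integers.length : Int)) 1) := by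
  induction integers with
  | nil =>
    intro k
    have h : PySem.List.pyRange (k + 1) (k + 1 + (([] : List Int).length : Int)) 1 = [] :=
      PySem.List.pyRange_one_eq_nil (by simp)
    rw [h]
    simp [isIncLoop]
  | cons x xs ih =>
    intro k
    have hlen : (0 : Int) ≤ (xs.length : Int) := Int.natCast_nonneg _
    have hcons : PySem.List.pyRange (k + 1) (k + 1 + (((x :: xs).length : Int))) 1
        = (k + 1) :: PySem.List.pyRange (k + 1 + 1) (k + 1 + (((x :: xs).length : Int))) 1 :=
      PySem.List.pyRange_one_cons (by simp only [List.length_cons]; push_cast; omega)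
    rw [hcons, isIncLoop]
    by_cases hx : x = k + 1
    · subst hx
      rw [if_pos rfl, ih (k + 1)]
      rw [show k + 1 + 1 + (xs.length : Int) = k + 1 + ((xs.length : Int) + 1) by ring] at *
      rw [show (((((k + 1) :: xs)).length : Int)) = (xs.length : Int) + 1 by simp only [List.length_cons]; push_cast; ring]
      simp
    · rw [if_neg hx]
      symm
      simp [hx]

-- ===== VERDICT (by name: the statement is the Claim_ definition above) =====
theorem is_incrementing_spec : Claim_equal_is_incrementing := by
  intro integers _
  unfold Spec_is_incrementing is_incrementing is_incrementing_alt
  rw [isIncLoop_eq_range]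
  rw [show (0:Int) + 1 + (integers.length : Int) = (integers.length : Int) + 1 by ring]
  rw [show (0:Int) + 1 = (1:Int) by ring]
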